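-- pv_equiv track=rewrite | github.com/alexandraback/datacollection | solutions_5640146288377856_0/Python/minkymoodle/brattleship.py | solve
-- ===== SOURCE A (Python) =====
-- import math
--
-- def solve(r,c,w):
--   pts = 0
--   for i in range(r-1):
--     pts += int(math.floor(float(c) / w))
--   if c % w == 0:
--    pts += int(math.floor(float(c) / w)) + (w - 1)
--   else:
--     pts += int(math.floor(float(c) / w)) + w
--   return pts
-- ===== SOURCE B (Python) =====
-- def solve(r, c, w):
--     # Closed form: the loop adds floor(c/w) once per row in range(r-1),
--     # then one more floor(c/w) plus w-1 (if w divides c) or w.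
--     q = c // w
--     return max(r - 1, 0) * q + q + (w - 1 if c % w == 0 else w)
-- ===== Notes on version B (the rewrite author's own statement) =====
-- stated objective: faster
-- what changed: Replaces the O(r) loop that adds floor(c/w) once per row with the closed form max(r-1,0)*floor(c/w) plus the final term.
import Mathlib
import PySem

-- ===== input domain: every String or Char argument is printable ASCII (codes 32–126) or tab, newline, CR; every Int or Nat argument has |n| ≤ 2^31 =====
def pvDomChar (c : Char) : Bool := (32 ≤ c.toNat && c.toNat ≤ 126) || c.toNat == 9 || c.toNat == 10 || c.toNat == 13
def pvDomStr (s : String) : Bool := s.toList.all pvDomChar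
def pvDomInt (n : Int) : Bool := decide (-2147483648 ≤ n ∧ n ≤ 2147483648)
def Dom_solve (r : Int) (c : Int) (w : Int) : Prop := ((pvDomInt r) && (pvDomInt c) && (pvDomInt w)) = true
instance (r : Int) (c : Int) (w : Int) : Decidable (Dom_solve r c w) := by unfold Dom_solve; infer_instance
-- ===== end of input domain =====

-- B replaces A's O(r) loop with a closed form (kept exact for every r, c and w ≠ 0 in Dom).
-- ===== PORT A =====
-- int(math.floor(float(c) / w)) is ported as floor division: within Dom (|c|,|w| ≤ 2^31)
-- the double-precision quotient never crosses an integer boundary, so it is exact there.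
def solve (r : Int) (c : Int) (w : Int) : Int :=
  let pts : Int := (PySem.List.pyRange 0 (r - 1) 1).foldl
    (fun pts _ => pts + PySem.Int.floordiv c w) 0
  if PySem.Int.mod c w = 0 then
    pts + (PySem.Int.floordiv c w + (w - 1))
  else
    pts + (PySem.Int.floordiv c w + w)

-- ===== PORT B =====
def solve_alt (r : Int) (c : Int) (w : Int) : Int :=
  let q : Int := PySem.Int.floordiv c w
  max (r - 1) 0 * q + q + (if PySem.Int.mod c w = 0 then w - 1 else w)

-- ===== PRECONDITION & SPEC =====
-- Pre_ excludes exactly w = 0, where A raises ZeroDivisionError.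
def Pre_solve (r : Int) (c : Int) (w : Int) : Prop := w ≠ 0
instance (r : Int) (c : Int) (w : Int) : Decidable (Pre_solve r c w) := by unfold Pre_solve; infer_instance
def pvWitness_solve : Int × Int × Int := (3, 10, 4)

def Spec_solve (r : Int) (c : Int) (w : Int) (out : Int) : Prop := out = solve_alt r c w
instance (r : Int) (c : Int) (w : Int) (out : Int) : Decidable (Spec_solve r c w out) := by unfold Spec_solve; infer_instance

-- ===== CLAIM (what is proved, stated in full; the proofs are below) =====
def Claim_equal_solve : Prop := ∀ (r : Int) (c : Int) (w : Int), Dom_solve r c w → Pre_solve r c w → Spec_solve r c w (solve r c w)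

-- ===== LEMMAS AND PROOFS =====

-- ===== VERDICT (by name: the statement is the Claim_ definition above) =====
-- Folding 'fun pts _ => pts + q' over any list adds q once per element.
theorem foldl_add_const (q : Int) (l : List Int) (acc : Int) :
    l.foldl (fun pts _ => pts + q) acc = acc + (l.length : Int) * q := by
  induction l generalizing acc with
  | nil => simp
  | cons x xs ih => simp [List.foldl, ih]; ring

theorem solve_spec : Claim_equal_solve := by
  intro r c w _ _
  unfold Spec_solve solve solve_alt
  rw [foldl_add_const, PySem.List.length_pyRange_one]
  have h : ((r - 1 - 0).toNat : Int) = max (r - 1) 0 := by omega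
  rw [h]
  split_ifs <;> ring
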